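-- pv_equiv track=rewrite | github.com/Marwa163-byte/CSE_406_OS_lab | FCFS_Disk_Scheduling(with head in req).py | fcfs_ds
-- ===== SOURCE A (Python) =====
-- def fcfs_ds(reqs, head):
--   total_seek_opt = 0
--   sequence = [head] #to store movment seq #ds= disk scheduling
--
--   for req in reqs:
--
--     mov = abs(req - head)
--     total_seek_opt += mov
--     head = req
--     sequence.append(head)
--   return total_seek_opt, sequence
-- ===== SOURCE B (Python) =====
-- def _seek(seg):
--   # total head movement along a contiguous segment of the route (divide and conquer)
--   if len(seg) < 2:
--     return 0
--   if len(seg) == 2: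
--     return abs(seg[1] - seg[0])
--   m = len(seg) // 2
--   return _seek(seg[:m + 1]) + _seek(seg[m:])
--
-- def fcfs_ds(reqs, head):
--   seq = [head] + list(reqs)
--   return _seek(seq), seq
-- ===== Notes on version B (the rewrite author's own statement) =====
-- stated objective: alternative
-- what changed: B builds the full route [head]+reqs up front and computes the total seek by divide and conquer: it splits the route at its midpoint and recurses on the two overlapping halves, instead of A's left-to-right loop threading a running head accumulator.
import Mathlib
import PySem

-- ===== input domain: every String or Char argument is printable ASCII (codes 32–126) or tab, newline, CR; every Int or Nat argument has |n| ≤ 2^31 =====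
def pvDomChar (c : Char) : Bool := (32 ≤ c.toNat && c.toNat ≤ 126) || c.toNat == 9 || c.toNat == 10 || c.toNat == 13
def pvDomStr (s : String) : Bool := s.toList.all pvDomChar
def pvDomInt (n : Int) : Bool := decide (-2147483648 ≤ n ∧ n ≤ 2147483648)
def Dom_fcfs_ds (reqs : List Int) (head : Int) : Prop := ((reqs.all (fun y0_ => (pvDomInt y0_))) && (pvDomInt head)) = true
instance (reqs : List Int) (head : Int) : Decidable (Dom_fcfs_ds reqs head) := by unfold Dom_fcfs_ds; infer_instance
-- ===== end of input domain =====

-- B computes the total seek by divide and conquer over the built route instead of A's running-head loop; same result, different algorithm shape.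
-- ===== PORT A =====
def fcfs_ds (reqs : List Int) (head : Int) : Int × List Int :=
  let st := reqs.foldl
    (fun (s : Int × Int × List Int) req =>
      (s.1 + |req - s.2.1|, req, s.2.2 ++ [req]))
    (0, head, [head])
  (st.1, st.2.2)

-- ===== PORT B =====
-- _seek: divide-and-conquer total movement along a segment; seg[1]/seg[0] are in range
-- in both branches that read them, so `.getD 0` is never the default. The fuel argument
-- (seg.length at the top call) is only a structural-termination device: each recursive
-- call is on a strictly shorter segment, so fuel never runs out.
def pvSeekGo (fuel : Nat) (seg : List Int) : Int :=
  match fuel with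
  | 0 => 0
  | fuel + 1 =>
    if seg.length < 2 then 0
    else if seg.length = 2 then
      |((PySem.List.pyGet? seg 1).getD 0) - ((PySem.List.pyGet? seg 0).getD 0)|
    else
      let m := seg.length / 2
      pvSeekGo fuel (PySem.List.slice seg none (some ((m : Int) + 1))) +
      pvSeekGo fuel (PySem.List.slice seg (some (m : Int)) none)

def pvSeek (seg : List Int) : Int := pvSeekGo seg.length seg

def fcfs_ds_alt (reqs : List Int) (head : Int) : Int × List Int :=
  let seq := head :: reqs
  (pvSeek seq, seq)

-- ===== PRECONDITION & SPEC =====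
def Spec_fcfs_ds (reqs : List Int) (head : Int) (out : Int × List Int) : Prop := out = fcfs_ds_alt reqs head
instance (reqs : List Int) (head : Int) (out : Int × List Int) : Decidable (Spec_fcfs_ds reqs head out) := by unfold Spec_fcfs_ds; infer_instance

-- ===== CLAIM =====
def Claim_equal_fcfs_ds : Prop := ∀ (reqs : List Int) (head : Int), Dom_fcfs_ds reqs head → Spec_fcfs_ds reqs head (fcfs_ds reqs head)

-- ===== LEMMAS AND PROOFS =====
-- Sum of absolute gaps between adjacent elements: the common characterisation of both ports.
def adjSum : List Int → Int
  | [] => 0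
  | [_] => 0
  | a :: b :: t => |b - a| + adjSum (b :: t)

lemma adjSum_split (y : Int) (ys : List Int) : ∀ xs : List Int,
    adjSum (xs ++ y :: ys) = adjSum (xs ++ [y]) + adjSum (y :: ys) := by
  intro xs
  induction xs with
  | nil =>
    cases ys with
    | nil => simp [adjSum]
    | cons b t => simp [adjSum]
  | cons a rest ih =>
    cases rest with
    | nil => simp [adjSum]
    | cons b t => simp only [List.cons_append, adjSum] at *; rw [ih]; ring

lemma pvSeekGo_eq_adjSum : ∀ (fuel : Nat) (seg : List Int), seg.length ≤ fuel →
    pvSeekGo fuel seg = adjSum seg := by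
  intro fuel
  induction fuel with
  | zero =>
    intro seg hle
    have : seg = [] := List.eq_nil_of_length_eq_zero (by omega)
    subst this; rfl
  | succ fuel ih =>
    intro seg hle
    by_cases h2 : seg.length < 2
    · rw [pvSeekGo]
      simp only [if_pos h2]
      match seg, h2 with
      | [], _ => rfl
      | [_], _ => rfl
    · by_cases he : seg.length = 2
      · match seg, he with
        | [a, b], _ =>
          rw [pvSeekGo]
          simp [adjSum, PySem.List.pyGet?, PySem.List.pyIdx?]
      · rw [pvSeekGo]
        simp only [if_neg h2, if_neg he]
        set m := seg.length / 2 with hm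
        have hmlt : m < seg.length := by omega
        have hm1 : 1 ≤ m := by omega
        set y := seg[m] with hy0
        have hy : seg[m]? = some y := seg.getElem?_eq_getElem hmlt
        have hsliceL : PySem.List.slice seg none (some ((m : Int) + 1)) = seg.take (m + 1) := by
          have : ((m : Int) + 1) = ((m + 1 : Nat) : Int) := by push_cast; ring
          rw [this, PySem.List.slice_to_natCast]
        have hsliceR : PySem.List.slice seg (some (m : Int)) none = seg.drop m := by
          rw [PySem.List.slice_from_natCast]
        have htake : seg.take (m + 1) = seg.take m ++ [y] := by
          rw [List.take_add_one, hy]; rfl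
        have hdrop : seg.drop m = y :: seg.drop (m + 1) := by
          rw [List.drop_eq_getElem_cons hmlt]
        have hseg : seg = seg.take m ++ y :: seg.drop (m + 1) := by
          conv_lhs => rw [← List.take_append_drop m seg]
          rw [hdrop]
        have hlenL : (seg.take (m + 1)).length ≤ fuel := by
          simp only [List.length_take]; omega
        have hlenR : (seg.drop m).length ≤ fuel := by
          simp only [List.length_drop]; omega
        rw [hsliceL, hsliceR, ih _ hlenL, ih _ hlenR, htake, hdrop]
        conv_rhs => rw [hseg, adjSum_split]

lemma pvSeek_eq_adjSum (seg : List Int) : pvSeek seg = adjSum seg :=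
  pvSeekGo_eq_adjSum seg.length seg le_rfl

lemma loopA_char (reqs : List Int) : ∀ (head t : Int) (seq : List Int),
    reqs.foldl
      (fun (s : Int × Int × List Int) req =>
        (s.1 + |req - s.2.1|, req, s.2.2 ++ [req]))
      (t, head, seq)
      = (t + adjSum (head :: reqs),
         (reqs.foldl (fun (s : Int × Int × List Int) req =>
            (s.1 + |req - s.2.1|, req, s.2.2 ++ [req])) (t, head, seq)).2.1,
         seq ++ reqs) := by
  induction reqs with
  | nil => intro head t seq; simp [adjSum]
  | cons r rest ih =>
    intro head t seq
    simp only [List.foldl_cons]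
    rw [ih r (t + |r - head|) (seq ++ [r])]
    refine Prod.ext ?_ (Prod.ext rfl ?_)
    · show t + |r - head| + adjSum (r :: rest) = t + adjSum (head :: r :: rest)
      simp only [adjSum]; ring
    · simp

-- ===== VERDICT =====
theorem fcfs_ds_spec : Claim_equal_fcfs_ds := by
  intro reqs head _
  unfold Spec_fcfs_ds fcfs_ds fcfs_ds_alt
  rw [loopA_char reqs head 0 [head]]
  simp [pvSeek_eq_adjSum]
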